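-- pv_equiv track=rewrite | github.com/JoacoR7/RedesDeComputadoras | TP 1/tramasService.py | separarTramas
-- ===== SOURCE A (Python) =====
-- def separarTramas(text):
--     tramas = []
--     trama = "7E"
--
--     for i in range(2, len(text), 2):
--         byte = text[i:i+2]
--         if(byte != "7E"):
--             trama = trama + byte
--         else:
--             if(text[i-2:i] == "7D"):
--                 trama = trama + byte
--             else:
--                 tramas.append(trama)
--                 trama = "7E"
--
--     return tramas
-- ===== SOURCE B (Python) =====
-- def separarTramas(text):
--     # Collect delimiter start positions in one pass, then emit frames by slicing.
--     delims = [0]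
--     for i in range(2, len(text), 2):
--         if text[i:i+2] == "7E" and text[i-2:i] != "7D":
--             delims.append(i)
--     return ["7E" + text[p+2:q] for p, q in zip(delims, delims[1:])]
-- ===== Notes on version B (the rewrite author's own statement) =====
-- stated objective: alternative
-- what changed: Replaced the incremental frame-accumulation state machine (growing the current frame byte by byte) with an index-table-then-slice decomposition: one pass collects unescaped 7E delimiter positions, then frames are produced by slicing between consecutive delimiters.
import Mathlib
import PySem

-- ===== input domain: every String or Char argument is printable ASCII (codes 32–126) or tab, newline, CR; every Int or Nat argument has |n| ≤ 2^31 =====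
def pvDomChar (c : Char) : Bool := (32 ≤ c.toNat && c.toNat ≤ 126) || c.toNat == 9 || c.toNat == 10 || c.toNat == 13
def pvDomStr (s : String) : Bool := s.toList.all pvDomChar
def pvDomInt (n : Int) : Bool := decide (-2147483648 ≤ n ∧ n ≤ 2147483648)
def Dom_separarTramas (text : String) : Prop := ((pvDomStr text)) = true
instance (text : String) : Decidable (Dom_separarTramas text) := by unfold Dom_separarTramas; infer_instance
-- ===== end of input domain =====

-- B changes the decomposition: a delimiter-position table plus slicing instead of A's
-- byte-by-byte frame accumulator; same return value, no speed claim.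

-- ===== PORT A =====
-- state machine step of A's loop: state = (tramas, current trama), all as char lists
def sepAstep (cs : List Char) (st : List (List Char) × List Char) (i : Int) :
    List (List Char) × List Char :=
  let byte := PySem.List.slice cs (some i) (some (i + 2))
  if byte ≠ ['7', 'E'] then (st.1, st.2 ++ byte)
  else if PySem.List.slice cs (some (i - 2)) (some i) = ['7', 'D'] then (st.1, st.2 ++ byte)
  else (st.1 ++ [st.2], ['7', 'E'])

def separarTramas (text : String) : List String :=
  let cs := text.toList
  (((PySem.List.pyRange 2 (PySem.Str.len text) 2).foldl (sepAstep cs)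
      ([], ['7', 'E'])).1).map String.ofList

-- ===== PORT B =====
-- one pass collecting unescaped 7E delimiter positions
def sepBstep (cs : List Char) (D : List Int) (i : Int) : List Int :=
  if PySem.List.slice cs (some i) (some (i + 2)) = ['7', 'E'] ∧
     PySem.List.slice cs (some (i - 2)) (some i) ≠ ['7', 'D'] then D ++ [i] else D

-- frame between consecutive delimiters p, q: "7E" + text[p+2:q]
def sepBframe (cs : List Char) (pq : Int × Int) : List Char :=
  '7' :: 'E' :: PySem.List.slice cs (some (pq.1 + 2)) (some pq.2)

def separarTramas_alt (text : String) : List String :=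
  let cs := text.toList
  let D := (PySem.List.pyRange 2 (PySem.Str.len text) 2).foldl (sepBstep cs) [0]
  (D.zip D.tail).map (fun pq => String.ofList (sepBframe cs pq))

-- ===== PRECONDITION & SPEC =====
def Spec_separarTramas (text : String) (out : List String) : Prop := out = separarTramas_alt text
instance (text : String) (out : List String) : Decidable (Spec_separarTramas text out) := by unfold Spec_separarTramas; infer_instance

-- ===== CLAIM (what is proved, stated in full; the proofs are below) =====
def Claim_equal_separarTramas : Prop := ∀ (text : String), Dom_separarTramas text → Spec_separarTramas text (separarTramas text)

-- ===== LEMMAS AND PROOFS =====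

-- appending a new delimiter to a nonempty table adds exactly one consecutive pair
lemma zip_tail_concat {D : List Int} {p q : Int} (h : D.getLast? = some p) :
    (D ++ [q]).zip (D ++ [q]).tail = D.zip D.tail ++ [(p, q)] := by
  induction D with
  | nil => simp at h
  | cons a t ih =>
    cases t with
    | nil => simp_all
    | cons b u => simpa using ih (by simpa using h)

-- the loop invariant: processing indices j, j+2, … from related states keeps A's tramas
-- equal to the frames of B's delimiter table, with the pending trama a slice from the
-- last delimiter p
lemma sep_inv (cs : List Char) :
    ∀ (n j p : Nat) (D : List Int) (tramas : List (List Char)),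
      p + 2 ≤ j → D.getLast? = some (p : Int) →
      tramas = (D.zip D.tail).map (sepBframe cs) →
      (((List.range n).map (fun k : Nat => ((j : Int) + 2 * (k : Int)))).foldl (sepAstep cs)
          (tramas, '7' :: 'E' :: (cs.drop (p + 2)).take (j - (p + 2)))).1 =
        (let E := ((List.range n).map (fun k : Nat => ((j : Int) + 2 * (k : Int)))).foldl (sepBstep cs) D
         (E.zip E.tail).map (sepBframe cs)) := by
  intro n
  induction n with
  | zero => intro j p D tramas _ _ ht; simpa using ht
  | succ n ih =>
    intro j p D tramas hpj hlast ht
    have hrange : (List.range (n + 1)).map (fun k : Nat => ((j : Int) + 2 * (k : Int))) =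
        ((j : Int) + 2 * ((0 : Nat) : Int)) ::
          (List.range n).map (fun k : Nat => (((j + 2 : Nat) : Int) + 2 * (k : Int))) := by
      rw [List.range_succ_eq_map, List.map_cons, List.map_map]
      congr 1
      apply List.map_congr_left
      intro k _
      simp only [Function.comp]
      push_cast
      ring
    rw [hrange]
    simp only [List.foldl_cons]
    -- rewrite the two slices at index j into drop/take form
    have hj2 : ((j : Int) + 2) = ((j + 2 : Nat) : Int) := by push_cast; ring
    have hjm2 : ((j : Int) - 2) = ((j - 2 : Nat) : Int) := by
      have : 2 ≤ j := by omega
      push_cast [this]; ring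
    have hbyte : PySem.List.slice cs (some (j : Int)) (some ((j : Int) + 2)) =
        (cs.drop j).take 2 := by
      rw [hj2, PySem.List.slice_natCast]
      congr 1; omega
    have hprev : PySem.List.slice cs (some ((j : Int) - 2)) (some (j : Int)) =
        (cs.drop (j - 2)).take 2 := by
      rw [hjm2, PySem.List.slice_natCast]
      congr 1; omega
    by_cases hB : (cs.drop j).take 2 = ['7', 'E'] ∧ (cs.drop (j - 2)).take 2 ≠ ['7', 'D']
    · -- delimiter case: A closes the trama, B records j
      have hA : sepAstep cs (tramas, '7' :: 'E' :: (cs.drop (p + 2)).take (j - (p + 2)))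
            ((j : Int) + 2 * ((0 : Nat) : Int)) =
          (tramas ++ ['7' :: 'E' :: (cs.drop (p + 2)).take (j - (p + 2))], ['7', 'E']) := by
        simp only [sepAstep, Nat.cast_zero, mul_zero, add_zero, hbyte, hprev]
        simp [hB.1, hB.2]
      have hBs : sepBstep cs D ((j : Int) + 2 * ((0 : Nat) : Int)) = D ++ [(j : Int)] := by
        simp only [sepBstep, Nat.cast_zero, mul_zero, add_zero, hbyte, hprev]
        simp [hB.1, hB.2]
      rw [hA, hBs]
      have hframe : sepBframe cs ((p : Int), (j : Int)) =
          '7' :: 'E' :: (cs.drop (p + 2)).take (j - (p + 2)) := by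
        simp only [sepBframe]
        rw [show ((p : Int) + 2) = ((p + 2 : Nat) : Int) by push_cast; ring,
          PySem.List.slice_natCast]
      have := ih (j + 2) j (D ++ [(j : Int)])
        (tramas ++ ['7' :: 'E' :: (cs.drop (p + 2)).take (j - (p + 2))])
        (by omega) (by simp)
        (by rw [zip_tail_concat hlast, List.map_append, ht, List.map_singleton, hframe])
      simpa using this
    · -- non-delimiter (or escaped) case: A extends the trama, B unchanged
      have hA : sepAstep cs (tramas, '7' :: 'E' :: (cs.drop (p + 2)).take (j - (p + 2)))
            ((j : Int) + 2 * ((0 : Nat) : Int)) =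
          (tramas, '7' :: 'E' ::
            ((cs.drop (p + 2)).take (j - (p + 2)) ++ (cs.drop j).take 2)) := by
        simp only [sepAstep, Nat.cast_zero, mul_zero, add_zero, hbyte, hprev]
        by_cases h1 : (cs.drop j).take 2 = ['7', 'E']
        · have h2 : (cs.drop (j - 2)).take 2 = ['7', 'D'] := by
            by_contra h2; exact hB ⟨h1, h2⟩
          simp [h1, h2]
        · simp [h1]
      have hBs : sepBstep cs D ((j : Int) + 2 * ((0 : Nat) : Int)) = D := by
        simp only [sepBstep, Nat.cast_zero, mul_zero, add_zero, hbyte, hprev]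
        simp [hB]
      rw [hA, hBs]
      have hglue : (cs.drop (p + 2)).take (j - (p + 2)) ++ (cs.drop j).take 2 =
          (cs.drop (p + 2)).take (j + 2 - (p + 2)) := by
        have hd : cs.drop j = (cs.drop (p + 2)).drop (j - (p + 2)) := by
          rw [List.drop_drop]; congr 1; omega
        rw [hd, ← List.take_add]
        congr 1; omega
      rw [hglue]
      exact ih (j + 2) p D tramas (by omega) hlast ht

-- ===== VERDICT (by name: the statement is the Claim_ definition above) =====
theorem separarTramas_spec : Claim_equal_separarTramas := by
  intro text _
  unfold Spec_separarTramas separarTramas separarTramas_alt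
  have hrange : PySem.List.pyRange 2 (PySem.Str.len text) 2 =
      (List.range (if (2 : Int) < PySem.Str.len text
          then ((PySem.Str.len text - 2 + 2 - 1) / 2).toNat else 0)).map
        (fun k : Nat => (((2 : Nat) : Int) + 2 * (k : Int))) := by
    rw [PySem.List.pyRange_of_pos 2 _ (by norm_num)]
    norm_num
  have h := sep_inv text.toList (if (2 : Int) < PySem.Str.len text
      then ((PySem.Str.len text - 2 + 2 - 1) / 2).toNat else 0) 2 0 [0] []
    (by omega) (by norm_num) (by simp)
  simp only [Nat.sub_self, List.take_zero] at h
  simp only [hrange]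
  rw [h, List.map_map]
  rfl
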